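-- pv_equiv track=rewrite | github.com/MrBrantCode/unitest_baseline | mut_generate/mist_train_cf/cf_9388/solution.py | sum_of_odd_numbers
-- ===== SOURCE A (Python) =====
-- def sum_of_odd_numbers(n):
--     count = 0
--     sum = 0
--     number = 1
--
--     while count < n:
--         if number % 3 != 0:
--             sum += number
--             count += 1
--         number += 2
--
--     return sum
-- ===== SOURCE B (Python) =====
-- def sum_of_odd_numbers(n):
--     # Closed form: the odd numbers not divisible by 3 come in pairs (6j+1, 6j+5);
--     # q full pairs sum to 6*q*q, an odd leftover adds 6*q+1.
--     if n <= 0: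
--         return 0
--     q, r = divmod(n, 2)
--     return 6 * q * q + (6 * q + 1 if r else 0)
-- ===== Notes on version B (the rewrite author's own statement) =====
-- stated objective: faster
-- what changed: Replaced the O(n) while-loop that filters odd numbers by divisibility with an O(1) closed-form formula 6*q^2 (+6*q+1 for an odd leftover) where q = n//2, using the pair structure (6j+1, 6j+5).
import Mathlib
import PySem

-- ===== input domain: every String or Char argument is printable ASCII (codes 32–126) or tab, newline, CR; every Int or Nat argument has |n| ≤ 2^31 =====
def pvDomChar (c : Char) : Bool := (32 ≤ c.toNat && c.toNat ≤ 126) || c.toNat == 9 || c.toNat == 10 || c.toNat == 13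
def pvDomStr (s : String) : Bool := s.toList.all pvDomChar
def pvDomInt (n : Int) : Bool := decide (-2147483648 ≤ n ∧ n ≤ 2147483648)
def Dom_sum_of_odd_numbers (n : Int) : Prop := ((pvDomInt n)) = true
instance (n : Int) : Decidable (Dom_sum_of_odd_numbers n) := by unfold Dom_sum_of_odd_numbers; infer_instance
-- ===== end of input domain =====

-- B replaces A's O(n) filtering loop by an O(1) closed-form formula over the pairs (6j+1, 6j+5).


-- ===== PORT A =====
-- the while loop of A, state (count, number, sum)
def sumOddLoop (n count number sum : Int) : Int :=
  if _h : count < n then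
    if PySem.Int.mod number 3 ≠ 0 then
      sumOddLoop n (count + 1) (number + 2) (sum + number)
    else
      sumOddLoop n count (number + 2) sum
  else sum
termination_by (3 * (n - count) + (if PySem.Int.mod number 3 = 0 then 1 else 0)).toNat
decreasing_by
  all_goals
    simp only [show ∀ a : Int, PySem.Int.mod a 3 = a % 3 from
      fun a => PySem.Int.mod_eq_emod_of_pos (by omega)] at *
    split_ifs at * <;> omega

def sum_of_odd_numbers (n : Int) : Int := sumOddLoop n 0 1 0

-- ===== PORT B =====
def sum_of_odd_numbers_alt (n : Int) : Int :=
  if n ≤ 0 then 0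
  else
    let q := PySem.Int.floordiv n 2
    let r := PySem.Int.mod n 2
    6 * q * q + (if r ≠ 0 then 6 * q + 1 else 0)

-- ===== PRECONDITION & SPEC =====
def Spec_sum_of_odd_numbers (n : Int) (out : Int) : Prop := out = sum_of_odd_numbers_alt n
instance (n : Int) (out : Int) : Decidable (Spec_sum_of_odd_numbers n out) := by unfold Spec_sum_of_odd_numbers; infer_instance

-- ===== CLAIM (what is proved, stated in full; the proofs are below) =====
def Claim_equal_sum_of_odd_numbers : Prop := ∀ (n : Int), Dom_sum_of_odd_numbers n → Spec_sum_of_odd_numbers n (sum_of_odd_numbers n)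

-- ===== LEMMAS AND PROOFS =====

theorem modP3 (a : Int) : PySem.Int.mod a 3 = a % 3 :=
  PySem.Int.mod_eq_emod_of_pos (by omega)

theorem modP2 (a : Int) : PySem.Int.mod a 2 = a % 2 :=
  PySem.Int.mod_eq_emod_of_pos (by omega)

theorem mod3_of_6j1 (j : Int) : PySem.Int.mod (6 * j + 1) 3 ≠ 0 := by
  rw [modP3]; omega

theorem mod3_of_6j3 (j : Int) : ¬ (PySem.Int.mod (6 * j + 1 + 2) 3 ≠ 0) := by
  rw [modP3]; omega

theorem mod3_of_6j5 (j : Int) : PySem.Int.mod (6 * j + 1 + 2 + 2) 3 ≠ 0 := by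
  rw [modP3]; omega

theorem alt_even (j : Int) (hj : 0 < j) : sum_of_odd_numbers_alt (2 * j) = 6 * j * j := by
  have hq : PySem.Int.floordiv (2 * j) 2 = j := by
    rw [PySem.Int.floordiv_eq_ediv_of_pos (by omega)]; omega
  have hr : PySem.Int.mod (2 * j) 2 = 0 := by rw [modP2]; omega
  simp only [sum_of_odd_numbers_alt, hq, hr]
  rw [if_neg (by omega)]
  norm_num

theorem alt_odd (j : Int) (hj : 0 ≤ j) : sum_of_odd_numbers_alt (2 * j + 1) = 6 * j * j + (6 * j + 1) := by
  have hq : PySem.Int.floordiv (2 * j + 1) 2 = j := by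
    rw [PySem.Int.floordiv_eq_ediv_of_pos (by omega)]; omega
  have hr : PySem.Int.mod (2 * j + 1) 2 = 1 := by rw [modP2]; omega
  simp only [sum_of_odd_numbers_alt, hq, hr]
  rw [if_neg (by omega)]
  norm_num

-- the key invariant: from a pair boundary (count = 2j, number = 6j+1, sum = 6j²) the
-- loop computes the closed form
theorem sumOddLoop_closed (j n : Int) (hj : 0 ≤ j) (hjn : 2 * j ≤ n) :
    sumOddLoop n (2 * j) (6 * j + 1) (6 * j * j) = sum_of_odd_numbers_alt n := by
  by_cases hstop : n ≤ 2 * j + 1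
  · by_cases heq : n = 2 * j
    · -- loop exits immediately
      rw [sumOddLoop, dif_neg (by omega : ¬ (2 * j < n))]
      subst heq
      rcases eq_or_lt_of_le hj with h0 | h0
      · simp [sum_of_odd_numbers_alt, ← h0]
      · rw [alt_even j h0]
    · -- n = 2j + 1 : one more element is taken, then the loop exits
      have hn : n = 2 * j + 1 := by omega
      subst hn
      rw [sumOddLoop, dif_pos (by omega : 2 * j < 2 * j + 1), if_pos (mod3_of_6j1 j)]
      rw [sumOddLoop, dif_neg (by omega : ¬ (2 * j + 1 < 2 * j + 1))]
      rw [alt_odd j hj]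
  · -- a full pair remains: three loop steps advance j to j + 1
    rw [sumOddLoop, dif_pos (by omega : 2 * j < n), if_pos (mod3_of_6j1 j)]
    rw [sumOddLoop, dif_pos (by omega : 2 * j + 1 < n), if_neg (mod3_of_6j3 j)]
    rw [sumOddLoop, dif_pos (by omega : 2 * j + 1 < n), if_pos (mod3_of_6j5 j)]
    have e1 : (2 : Int) * j + 1 + 1 = 2 * (j + 1) := by ring
    have e2 : (6 : Int) * j + 1 + 2 + 2 + 2 = 6 * (j + 1) + 1 := by ring
    have e3 : (6 : Int) * j * j + (6 * j + 1) + (6 * j + 1 + 2 + 2) =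
        6 * (j + 1) * (j + 1) := by ring
    rw [e1, e2, e3]
    exact sumOddLoop_closed (j + 1) n (by omega) (by omega)
termination_by (n - 2 * j).toNat
decreasing_by omega

-- ===== VERDICT (by name: the statement is the Claim_ definition above) =====
theorem sum_of_odd_numbers_spec : Claim_equal_sum_of_odd_numbers := by
  unfold Claim_equal_sum_of_odd_numbers
  intro n _
  unfold Spec_sum_of_odd_numbers sum_of_odd_numbers
  by_cases hn : n ≤ 0
  · rw [sumOddLoop]
    have : ¬ ((0 : Int) < n) := by omega
    simp [this, sum_of_odd_numbers_alt, hn]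
  · have := sumOddLoop_closed 0 n (by omega) (by omega)
    simpa using this
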